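-- pv_equiv track=rewrite | github.com/clauseggers/ClausGlyphsScripts | Metainfo/SetMetaInfo.py | _parse_simple_toml
-- ===== SOURCE A (Python) =====
-- from typing import Dict, Any
--
-- def _parse_simple_toml(text: str) -> Dict[str, Any]:
-- 	"""
-- 	Minimal TOML parser for key = "value" lines with optional single- or triple-quoted strings.
-- 	Supports comments (# ...) and blank lines. Multiline values using three double quotes or three single quotes.
-- 	Returns a dict with string values.
-- 	"""
-- 	data: Dict[str, Any] = {}
-- 	lines = text.splitlines()
-- 	i = 0
-- 	while i < len(lines):
-- 		raw = lines[i]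
-- 		line = raw.strip()
-- 		i += 1
-- 		if not line or line.startswith("#"):
-- 			continue
-- 		# Remove inline comments that start with # not inside quotes (simple heuristic)
-- 		def _strip_inline_comment(s: str) -> str:
-- 			out = []
-- 			in_single = False
-- 			in_double = False
-- 			j = 0
-- 			while j < len(s):
-- 				ch = s[j]
-- 				if ch == "'" and not in_double:
-- 					in_single = not in_single
-- 					out.append(ch)
-- 				elif ch == '"' and not in_single:
-- 					in_double = not in_double
-- 					out.append(ch)
-- 				elif ch == "#" and not in_single and not in_double:
-- 					break
-- 				else:
-- 					out.append(ch)
-- 				j += 1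
-- 			return "".join(out).rstrip()
--
-- 		line = _strip_inline_comment(line)
-- 		if not line or "=" not in line:
-- 			continue
-- 		key, value = line.split("=", 1)
-- 		key = key.strip()
-- 		value = value.strip()
--
-- 		# Multiline triple-quoted strings
-- 		triple_double = '"""'
-- 		triple_single = "'''"
-- 		if value.startswith(triple_double):
-- 			if value.endswith(triple_double) and len(value) > 3:
-- 				# Single-line triple-quoted
-- 				data[key] = value[3:-3]
-- 				continue
-- 			# Accumulate until closing """
-- 			acc = [value[3:]]
-- 			while i < len(lines):
-- 				part = lines[i]
-- 				i += 1
-- 				if part.endswith(triple_double):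
-- 					acc.append(part[:-3])
-- 					break
-- 				acc.append(part)
-- 			data[key] = "\n".join(acc)
-- 			continue
-- 		if value.startswith(triple_single):
-- 			if value.endswith(triple_single) and len(value) > 3:
-- 				data[key] = value[3:-3]
-- 				continue
-- 			acc = [value[3:]]
-- 			while i < len(lines):
-- 				part = lines[i]
-- 				i += 1
-- 				if part.endswith(triple_single):
-- 					acc.append(part[:-3])
-- 					break
-- 				acc.append(part)
-- 			data[key] = "\n".join(acc)
-- 			continue
--
-- 		# Quoted string
-- 		if (value.startswith('"') and value.endswith('"')) or (value.startswith("'") and value.endswith("'")):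
-- 			data[key] = value[1:-1]
-- 			continue
--
-- 		# Bare value (treat as string)
-- 		data[key] = value
-- 	return data
-- ===== SOURCE B (Python) =====
-- from typing import Dict, Any
--
-- def _strip_inline(s: str) -> str:
--     out = []
--     in_single = False
--     in_double = False
--     for ch in s:
--         if ch == "'" and not in_double:
--             in_single = not in_single
--         elif ch == '"' and not in_single:
--             in_double = not in_double
--         elif ch == "#" and not in_single and not in_double:
--             break
--         out.append(ch)
--     return "".join(out).rstrip()
--
-- def _parse_simple_toml(text: str) -> Dict[str, Any]:
--     data: Dict[str, Any] = {}
--     pending = None  # (key, delimiter, accumulated parts) while inside a multiline string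
--     for raw in text.splitlines():
--         if pending is not None:
--             key, delim, acc = pending
--             if raw.endswith(delim):
--                 data[key] = "\n".join(acc + [raw[:-3]])
--                 pending = None
--             else:
--                 acc.append(raw)
--             continue
--         line = _strip_inline(raw.strip())
--         if not line or "=" not in line:
--             continue
--         key, value = line.split("=", 1)
--         key = key.strip()
--         value = value.strip()
--         head = value[:3]
--         if head in ('"""', "'''"):
--             if value.endswith(head) and len(value) > 3:
--                 data[key] = value[3:-3]
--             else:
--                 pending = (key, head, [value[3:]])
--         elif value[:1] in ('"', "'") and value.endswith(value[:1]):
--             data[key] = value[1:-1]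
--         else:
--             data[key] = value
--     if pending is not None:
--         key, _, acc = pending
--         data[key] = "\n".join(acc)
--     return data
-- ===== Notes on version B (the rewrite author's own statement) =====
-- stated objective: simpler
-- what changed: Replaced A's index-driven while loop with nested inner collection while loops (and a nested _strip_inline_comment function re-defined on every iteration) by a single forward for-pass over the lines carrying an explicit parser state (pending key/delimiter/accumulator) that is flushed at end of input.
import Mathlib
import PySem

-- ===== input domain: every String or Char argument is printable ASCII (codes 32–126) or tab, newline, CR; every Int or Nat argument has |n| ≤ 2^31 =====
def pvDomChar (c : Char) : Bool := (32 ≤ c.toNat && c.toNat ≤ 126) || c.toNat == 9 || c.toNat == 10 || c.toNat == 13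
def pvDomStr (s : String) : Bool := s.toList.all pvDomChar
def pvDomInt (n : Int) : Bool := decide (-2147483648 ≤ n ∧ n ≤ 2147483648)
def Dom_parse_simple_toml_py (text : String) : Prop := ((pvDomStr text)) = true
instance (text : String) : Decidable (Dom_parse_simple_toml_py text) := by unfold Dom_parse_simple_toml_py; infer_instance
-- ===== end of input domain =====

-- B replaces A's index-driven while loop with nested collection loops by a single forward pass
-- carrying an explicit parser state (pending multiline key/delimiter/accumulator); objective: simpler.

-- ===== PORT A =====
-- the inline-comment stripper (identical helper in both Python sources)
def pvStripInlineGo : List Char → List Char → Bool → Bool → List Char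
  | [], out, _, _ => out
  | ch :: rest, out, inS, inD =>
    if ch = '\'' ∧ ¬(inD = true) then pvStripInlineGo rest (out ++ [ch]) (!inS) inD
    else if ch = '"' ∧ ¬(inS = true) then pvStripInlineGo rest (out ++ [ch]) inS (!inD)
    else if ch = '#' ∧ ¬(inS = true) ∧ ¬(inD = true) then out
    else pvStripInlineGo rest (out ++ [ch]) inS inD

def pvStripInline (s : String) : String :=
  PySem.Str.rstrip (String.ofList (pvStripInlineGo s.toList [] false false))

-- A's inner `while i < len(lines)` accumulation loop for a triple-quoted value:
-- returns the accumulated parts and the remaining lines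
def pvCollectA (delim : String) (acc : List String) : List String → List String × List String
  | [] => (acc, [])
  | part :: rest =>
    if PySem.Str.endswith part delim then
      (acc ++ [PySem.Str.slice part none (some (-3))], rest)
    else pvCollectA delim (acc ++ [part]) rest

theorem pvCollectA_snd_length (delim : String) (acc rest : List String) :
    (pvCollectA delim acc rest).2.length ≤ rest.length := by
  induction rest generalizing acc with
  | nil => simp [pvCollectA]
  | cons part rest ih =>
    simp only [pvCollectA]
    split
    · simp
    · exact le_trans (ih _) (by simp)

-- A's outer `while i < len(lines)` loop
def pvGoA (data : PySem.Dict String String) (rest : List String) : PySem.Dict String String :=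
  match h : rest with
  | [] => data
  | raw :: rest' =>
    let line := PySem.Str.strip raw
    if line = "" ∨ PySem.Str.startswith line "#" then pvGoA data rest'
    else
      let line2 := pvStripInline line
      if line2 = "" ∨ ¬ (PySem.Str.isIn "=" line2 = true) then pvGoA data rest'
      else
        let parts := (PySem.Str.splitMax? line2 "=" 1).getD []
        let key := PySem.Str.strip (parts.getD 0 "")
        let value := PySem.Str.strip (parts.getD 1 "")
        if PySem.Str.startswith value "\"\"\"" then
          if PySem.Str.endswith value "\"\"\"" ∧ PySem.Str.len value > 3 then
            pvGoA (data.insert key (PySem.Str.slice value (some 3) (some (-3)))) rest'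
          else
            let r := pvCollectA "\"\"\"" [PySem.Str.slice value (some 3) none] rest'
            pvGoA (data.insert key (PySem.Str.join "\n" r.1)) r.2
        else if PySem.Str.startswith value "'''" then
          if PySem.Str.endswith value "'''" ∧ PySem.Str.len value > 3 then
            pvGoA (data.insert key (PySem.Str.slice value (some 3) (some (-3)))) rest'
          else
            let r := pvCollectA "'''" [PySem.Str.slice value (some 3) none] rest'
            pvGoA (data.insert key (PySem.Str.join "\n" r.1)) r.2
        else if (PySem.Str.startswith value "\"" ∧ PySem.Str.endswith value "\"") ∨
                (PySem.Str.startswith value "'" ∧ PySem.Str.endswith value "'") then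
          pvGoA (data.insert key (PySem.Str.slice value (some 1) (some (-1)))) rest'
        else
          pvGoA (data.insert key value) rest'
termination_by rest.length
decreasing_by
  all_goals subst h
  all_goals simp
  · exact pvCollectA_snd_length _ _ _
  · exact pvCollectA_snd_length _ _ _

def parse_simple_toml_py (text : String) : List (String × String) :=
  (pvGoA PySem.Dict.empty (PySem.Str.splitlines text)).items

-- ===== PORT B =====
-- B's single pass with explicit parser state: `pending = some (key, delimiter, parts)`
-- while collecting a multiline value, flushed at end of input
def pvGoB (data : PySem.Dict String String)
    (pending : Option (String × String × List String)) :
    List String → PySem.Dict String String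
  | [] =>
    match pending with
    | none => data
    | some (k, _, acc) => data.insert k (PySem.Str.join "\n" acc)
  | raw :: rest =>
    match pending with
    | some (k, d, acc) =>
      if PySem.Str.endswith raw d then
        pvGoB (data.insert k (PySem.Str.join "\n" (acc ++ [PySem.Str.slice raw none (some (-3))]))) none rest
      else pvGoB data (some (k, d, acc ++ [raw])) rest
    | none =>
      let line := pvStripInline (PySem.Str.strip raw)
      if line = "" ∨ ¬ (PySem.Str.isIn "=" line = true) then pvGoB data none rest
      else
        let parts := (PySem.Str.splitMax? line "=" 1).getD []
        let key := PySem.Str.strip (parts.getD 0 "")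
        let value := PySem.Str.strip (parts.getD 1 "")
        let head := PySem.Str.slice value none (some 3)
        if head = "\"\"\"" ∨ head = "'''" then
          if PySem.Str.endswith value head ∧ PySem.Str.len value > 3 then
            pvGoB (data.insert key (PySem.Str.slice value (some 3) (some (-3)))) none rest
          else pvGoB data (some (key, head, [PySem.Str.slice value (some 3) none])) rest
        else
          let q := PySem.Str.slice value none (some 1)
          if (q = "\"" ∨ q = "'") ∧ PySem.Str.endswith value q then
            pvGoB (data.insert key (PySem.Str.slice value (some 1) (some (-1)))) none rest
          else pvGoB (data.insert key value) none rest

def parse_simple_toml_py_alt (text : String) : List (String × String) :=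
  (pvGoB PySem.Dict.empty none (PySem.Str.splitlines text)).items

-- ===== PRECONDITION & SPEC =====
def Spec_parse_simple_toml_py (text : String) (out : List (String × String)) : Prop := out = parse_simple_toml_py_alt text
instance (text : String) (out : List (String × String)) : Decidable (Spec_parse_simple_toml_py text out) := by unfold Spec_parse_simple_toml_py; infer_instance

-- ===== CLAIM (what is proved, stated in full; the proofs are below) =====
def Claim_equal_parse_simple_toml_py : Prop := ∀ (text : String), Dom_parse_simple_toml_py text → Spec_parse_simple_toml_py text (parse_simple_toml_py text)

-- ===== LEMMAS AND PROOFS =====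

-- an empty or '#'-leading line strips (inline-comment-wise) to the empty string
theorem pvStripInline_empty : pvStripInline "" = "" := by decide

theorem pvStripInline_hash (line : String) (h : PySem.Str.startswith line "#" = true) :
    pvStripInline line = "" := by
  have hpre : ("#".toList) <+: line.toList := by
    simpa using (PySem.Chars.startswith_iff _ _).mp (by simpa using h)
  obtain ⟨t, ht⟩ := hpre
  unfold pvStripInline
  rw [← ht]
  simp [pvStripInlineGo]
  decide

-- a length-n prefix slice equals p iff the string starts with p (p of length n)
theorem pv_slice_eq_iff (value p : String) (n : Int) (hn : 0 ≤ n)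
    (hp : p.toList.length = n.toNat) :
    (PySem.Str.slice value none (some n) = p) ↔ PySem.Str.startswith value p = true := by
  rw [show (PySem.Str.slice value none (some n) = p) ↔
        (PySem.Str.slice value none (some n)).toList = p.toList from
      ⟨fun h => by rw [h], fun h => String.toList_inj.mp h⟩]
  simp only [PySem.Str.toList_slice, PySem.Str.startswith_eq]
  rw [show PySem.Chars.slice value.toList none (some n) = PySem.List.slice value.toList none (some n) from rfl]
  rw [PySem.List.slice_to, PySem.Chars.startswith_iff]
  case hb => exact hn
  constructor
  · intro h
    rw [← h]
    exact List.take_prefix _ _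
  · intro h
    rw [List.prefix_iff_eq_take.mp h, hp]

theorem pv_collect_bridge (rest : List String) (data : PySem.Dict String String)
    (k d : String) (acc : List String) :
    pvGoB data (some (k, d, acc)) rest =
      pvGoB (data.insert k (PySem.Str.join "\n" (pvCollectA d acc rest).1)) none
        (pvCollectA d acc rest).2 := by
  induction rest generalizing acc data with
  | nil => simp [pvGoB, pvCollectA]
  | cons part rest ih =>
    by_cases h : PySem.Str.endswith part d = true
    all_goals simp only [PySem.Str.endswith_eq] at h
    · simp [pvGoB, pvCollectA, h]
    · simp [pvGoB, pvCollectA, h, ih]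

set_option maxHeartbeats 1000000 in
theorem pv_main (n : Nat) (rest : List String) (data : PySem.Dict String String)
    (hlen : rest.length ≤ n) : pvGoA data rest = pvGoB data none rest := by
  induction n generalizing rest data with
  | zero =>
    have : rest = [] := List.length_eq_zero_iff.mp (Nat.le_zero.mp hlen)
    subst this
    simp [pvGoA, pvGoB]
  | succ n ih =>
    match rest with
    | [] => simp [pvGoA, pvGoB]
    | raw :: rest' =>
      have hlen' : rest'.length ≤ n := by simpa using hlen
      rw [pvGoA]
      simp only []
      set line := PySem.Str.strip raw with hline
      by_cases h1 : line = "" ∨ PySem.Str.startswith line "#" = true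
      · -- A skips; B: stripInline line = ""
        have hB : pvStripInline line = "" := by
          rcases h1 with h1 | h1
          · rw [h1]; exact pvStripInline_empty
          · exact pvStripInline_hash _ h1
        simp only [pvGoB, ← hline, hB]
        simp [ih _ _ hlen']
      · simp only [h1, if_false]
        set line2 := pvStripInline line with hline2
        by_cases h2 : line2 = "" ∨ ¬ (PySem.Str.isIn "=" line2 = true)
        · simp only [pvGoB, ← hline, ← hline2, h2, if_true]
          simp [ih _ _ hlen']
        · simp only [h2, if_false]
          set parts := (PySem.Str.splitMax? line2 "=" 1).getD [] with hparts
          set key := PySem.Str.strip (parts.getD 0 "") with hkey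
          set value := PySem.Str.strip (parts.getD 1 "") with hvalue
          have hBstep : pvGoB data none (raw :: rest') =
              (let head := PySem.Str.slice value none (some 3)
               if head = "\"\"\"" ∨ head = "'''" then
                 if PySem.Str.endswith value head ∧ PySem.Str.len value > 3 then
                   pvGoB (data.insert key (PySem.Str.slice value (some 3) (some (-3)))) none rest'
                 else pvGoB data (some (key, head, [PySem.Str.slice value (some 3) none])) rest'
               else
                 let q := PySem.Str.slice value none (some 1)
                 if (q = "\"" ∨ q = "'") ∧ PySem.Str.endswith value q then
                   pvGoB (data.insert key (PySem.Str.slice value (some 1) (some (-1)))) none rest'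
                 else pvGoB (data.insert key value) none rest') := by
            simp only [pvGoB, ← hline, ← hline2, h2, if_false, ← hparts, ← hkey, ← hvalue]
          rw [hBstep]
          clear hBstep
          clear_value value key parts line2 line
          have htd := pv_slice_eq_iff value "\"\"\"" 3 (by norm_num) (by decide)
          have hts := pv_slice_eq_iff value "'''" 3 (by norm_num) (by decide)
          by_cases h3 : PySem.Str.startswith value "\"\"\"" = true
          · have hhead : PySem.Str.slice value none (some 3) = "\"\"\"" := htd.mpr h3
            simp only [h3, if_true, hhead]
            by_cases h4 : PySem.Str.endswith value "\"\"\"" = true ∧ PySem.Str.len value > 3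
            · simp only [h4, if_true, and_true]
              exact ih _ _ hlen'
            · simp only [if_neg h4]
              rw [pv_collect_bridge]
              exact ih _ _ (le_trans (pvCollectA_snd_length _ _ _) hlen')
          · have hhead : PySem.Str.slice value none (some 3) ≠ "\"\"\"" := by
              intro hc; exact h3 (htd.mp hc)
            simp only [h3]
            by_cases h5 : PySem.Str.startswith value "'''" = true
            · have hhead2 : PySem.Str.slice value none (some 3) = "'''" := hts.mpr h5
              simp only [h5, if_true, hhead2]
              by_cases h6 : PySem.Str.endswith value "'''" = true ∧ PySem.Str.len value > 3
              · simp only [h6, if_true, and_true]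
                exact ih _ _ hlen'
              · simp only [if_neg h6]
                rw [pv_collect_bridge]
                exact ih _ _ (le_trans (pvCollectA_snd_length _ _ _) hlen')
            · have hhead2 : PySem.Str.slice value none (some 3) ≠ "'''" := by
                intro hc; exact h5 (hts.mp hc)
              have hnot : ¬ (PySem.Str.slice value none (some 3) = "\"\"\"" ∨
                  PySem.Str.slice value none (some 3) = "'''") := by
                rintro (hc | hc)
                exacts [hhead hc, hhead2 hc]
              simp only [h5, if_neg hnot]
              have hq1 := pv_slice_eq_iff value "\"" 1 (by norm_num) (by decide)
              have hq2 := pv_slice_eq_iff value "'" 1 (by norm_num) (by decide)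
              by_cases h7 : (PySem.Str.startswith value "\"" = true ∧ PySem.Str.endswith value "\"" = true) ∨
                  (PySem.Str.startswith value "'" = true ∧ PySem.Str.endswith value "'" = true)
              · have hqcond : (PySem.Str.slice value none (some 1) = "\"" ∨
                    PySem.Str.slice value none (some 1) = "'") ∧
                    PySem.Str.endswith value (PySem.Str.slice value none (some 1)) = true := by
                  rcases h7 with ⟨hs, he⟩ | ⟨hs, he⟩
                  · exact ⟨Or.inl (hq1.mpr hs), by rw [hq1.mpr hs]; exact he⟩
                  · exact ⟨Or.inr (hq2.mpr hs), by rw [hq2.mpr hs]; exact he⟩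
                rw [if_pos h7, if_pos hqcond]
                exact ih _ _ hlen'
              · have hqcond : ¬ ((PySem.Str.slice value none (some 1) = "\"" ∨
                    PySem.Str.slice value none (some 1) = "'") ∧
                    PySem.Str.endswith value (PySem.Str.slice value none (some 1)) = true) := by
                  rintro ⟨hq | hq, he⟩
                  · exact h7 (Or.inl ⟨hq1.mp hq, by rwa [hq] at he⟩)
                  · exact h7 (Or.inr ⟨hq2.mp hq, by rwa [hq] at he⟩)
                rw [if_neg h7, if_neg hqcond]
                exact ih _ _ hlen'

-- ===== VERDICT (by name: the statement is the Claim_ definition above) =====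
theorem parse_simple_toml_py_spec : Claim_equal_parse_simple_toml_py := by
  intro text _
  unfold Spec_parse_simple_toml_py parse_simple_toml_py parse_simple_toml_py_alt
  rw [pv_main (PySem.Str.splitlines text).length _ _ (le_refl _)]
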